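-- pv_equiv track=rewrite | github.com/1wenwen1/Achilles | deployment/gen_ip.py | generate_servers
-- ===== SOURCE A (Python) =====
-- import math
--
-- def generate_servers(ip_list, n, m):
--     server_lines = []
--     used_ips = []
--     ip_count = len(ip_list)
--
--     # Adjust n to be a multiple of m if necessary
--     if n % m != 0:
--         n = math.ceil(n / m) * m
--
--     port_start = 8760
--     server_id = 0
--     for i in range(n):
--         ip = ip_list[(i // m) % ip_count]
--         if ip not in used_ips:
--             used_ips.append(ip)
--         base_port = port_start + (i % m)
--         port1 = base_port
--         port2 = base_port + 1000
--         server_lines.append(f"id:{server_id} host:{ip} port:{port1} port:{port2}")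
--         server_id += 1
--
--     return server_lines, used_ips
-- ===== SOURCE B (Python) =====
-- def generate_servers(ip_list, n, m):
--     ip_count = len(ip_list)
--     # Adjust n up to the next multiple of m (integer ceiling division)
--     if n % m != 0:
--         n = -(-n // m) * m
--     num_blocks = n // m
--     block_ips = [ip_list[b % ip_count] for b in range(num_blocks)]
--     used_ips = list(dict.fromkeys(block_ips))
--     server_lines = [
--         f"id:{b * m + o} host:{block_ips[b]} port:{8760 + o} port:{9760 + o}"
--         for b in range(num_blocks)
--         for o in range(m)
--     ]
--     return server_lines, used_ips
-- ===== Notes on version B (the rewrite author's own statement) =====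
-- stated objective: alternative
-- what changed: A's single interleaved loop over all n indices (with running server_id, per-index div/mod and an in-loop membership scan of used_ips) is replaced by two block-level passes: used_ips as the ordered dedup (dict.fromkeys) of the per-block ip sequence, and server_lines as a blocks-by-offsets comprehension with ids and ports computed in closed form; math.ceil(n/m) becomes integer ceiling division.
-- outside the precondition, e.g. on generate_servers(['', 'a'], -1, -1): A returns ([], []), B returns ([], [''])
import Mathlib
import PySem

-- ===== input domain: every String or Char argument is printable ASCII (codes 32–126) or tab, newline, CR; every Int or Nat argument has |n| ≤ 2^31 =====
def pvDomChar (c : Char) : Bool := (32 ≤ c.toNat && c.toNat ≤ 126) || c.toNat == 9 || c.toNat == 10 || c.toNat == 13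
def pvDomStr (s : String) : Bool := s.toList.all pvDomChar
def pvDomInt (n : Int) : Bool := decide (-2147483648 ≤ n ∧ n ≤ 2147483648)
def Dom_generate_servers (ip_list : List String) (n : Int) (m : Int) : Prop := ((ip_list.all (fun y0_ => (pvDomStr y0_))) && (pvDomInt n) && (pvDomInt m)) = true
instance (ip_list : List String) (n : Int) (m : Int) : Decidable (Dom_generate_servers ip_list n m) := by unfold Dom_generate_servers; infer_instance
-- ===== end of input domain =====

-- B replaces A's single interleaved loop over all n indices by two block-level passes
-- (ordered dedup of the per-block ip sequence, then a blocks×offsets comprehension): same values, different decomposition.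
-- NOTE: 'math.ceil(n / m)' is ported as integer ceiling division -((-n) // m); exact on Dom (|n| ≤ 2^31 < 2^53, so the float quotient never crosses an integer).

-- ===== PORT A =====
def generate_servers (ip_list : List String) (n : Int) (m : Int) : List String × List String :=
  let ip_count : Int := (ip_list.length : Int)
  -- if n % m != 0: n = math.ceil(n / m) * m   (ceil ported as -((-n)//m), exact on Dom)
  let n : Int := if PySem.Int.mod n m ≠ 0 then (-(PySem.Int.floordiv (-n) m)) * m else n
  -- for i in range(n): … with state (server_lines, used_ips, server_id)
  let st := (PySem.List.pyRange 0 n 1).foldl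
    (fun (st : List String × List String × Int) i =>
      let ip := PySem.List.pyGetD ip_list (PySem.Int.mod (PySem.Int.floordiv i m) ip_count) ""
      let used_ips := if ip ∈ st.2.1 then st.2.1 else st.2.1 ++ [ip]
      let base_port : Int := 8760 + PySem.Int.mod i m
      (st.1 ++ ["id:" ++ PySem.Int.toStr st.2.2 ++ " host:" ++ ip ++ " port:" ++ PySem.Int.toStr base_port ++ " port:" ++ PySem.Int.toStr (base_port + 1000)],
       used_ips, st.2.2 + 1))
    ([], [], 0)
  (st.1, st.2.1)

-- ===== PORT B =====
def generate_servers_alt (ip_list : List String) (n : Int) (m : Int) : List String × List String :=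
  let ip_count : Int := (ip_list.length : Int)
  let n : Int := if PySem.Int.mod n m ≠ 0 then (-(PySem.Int.floordiv (-n) m)) * m else n
  let num_blocks : Int := PySem.Int.floordiv n m
  let block_ips : List String :=
    (PySem.List.pyRange 0 num_blocks 1).map (fun b => PySem.List.pyGetD ip_list (PySem.Int.mod b ip_count) "")
  let used_ips : List String := PySem.List.dedup block_ips        -- list(dict.fromkeys(block_ips))
  let server_lines : List String :=
    (PySem.List.pyRange 0 num_blocks 1).flatMap (fun b =>
      (PySem.List.pyRange 0 m 1).map (fun o =>
        "id:" ++ PySem.Int.toStr (b * m + o) ++ " host:" ++ PySem.List.pyGetD block_ips b "" ++ " port:" ++ PySem.Int.toStr (8760 + o) ++ " port:" ++ PySem.Int.toStr (9760 + o)))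
  (server_lines, used_ips)

-- ===== PRECONDITION & SPEC =====
-- Pre_ restricts to the natural domain m ≥ 1 (m is the per-IP block size; m = 0 makes A raise
-- ZeroDivisionError, and for m < 0 A returns negative-port garbage no caller would mean, which B does not
-- reproduce), and excludes empty ip_list with n > 0, where A raises ZeroDivisionError at the index computation.
def Pre_generate_servers (ip_list : List String) (n : Int) (m : Int) : Prop :=
  1 ≤ m ∧ (ip_list ≠ [] ∨ n ≤ 0)
instance (ip_list : List String) (n : Int) (m : Int) : Decidable (Pre_generate_servers ip_list n m) := by unfold Pre_generate_servers; infer_instance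

def pvWitness_generate_servers : List String × Int × Int := (["10.0.0.1", "10.0.0.2"], 4, 2)

def Spec_generate_servers (ip_list : List String) (n : Int) (m : Int) (out : List String × List String) : Prop := out = generate_servers_alt ip_list n m
instance (ip_list : List String) (n : Int) (m : Int) (out : List String × List String) : Decidable (Spec_generate_servers ip_list n m out) := by unfold Spec_generate_servers; infer_instance

-- ===== CLAIM (what is proved, stated in full; the proofs are below) =====
def Claim_equal_generate_servers : Prop := ∀ (ip_list : List String) (n : Int) (m : Int), Dom_generate_servers ip_list n m → Pre_generate_servers ip_list n m → Spec_generate_servers ip_list n m (generate_servers ip_list n m)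

-- ===== LEMMAS AND PROOFS =====

-- the per-index ip A reads, the line A appends at index i, the per-block ip B reads
def pvIpA (ip_list : List String) (m i : Int) : String :=
  PySem.List.pyGetD ip_list (PySem.Int.mod (PySem.Int.floordiv i m) (ip_list.length : Int)) ""
def pvLineA (ip_list : List String) (m i : Int) : String :=
  "id:" ++ PySem.Int.toStr i ++ " host:" ++ pvIpA ip_list m i ++ " port:" ++ PySem.Int.toStr (8760 + PySem.Int.mod i m) ++ " port:" ++ PySem.Int.toStr (8760 + PySem.Int.mod i m + 1000)
def pvIpB (ip_list : List String) (b : Int) : String :=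
  PySem.List.pyGetD ip_list (PySem.Int.mod b (ip_list.length : Int)) ""
def pvLineB (ip_list : List String) (m b o : Int) : String :=
  "id:" ++ PySem.Int.toStr (b * m + o) ++ " host:" ++ pvIpB ip_list b ++ " port:" ++ PySem.Int.toStr (8760 + o) ++ " port:" ++ PySem.Int.toStr (9760 + o)

-- A's loop, normalised: server_id always equals the loop index, so the fold is a map plus a Set.ofList-style fold
theorem pvTrackA (ip_list : List String) (m : Int) (k : Nat) :
    ∀ (a : Int) (L U : List String),
    (PySem.List.pyRange a (a + (k : Int)) 1).foldl
      (fun (st : List String × List String × Int) i =>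
        (st.1 ++ ["id:" ++ PySem.Int.toStr st.2.2 ++ " host:" ++ PySem.List.pyGetD ip_list (PySem.Int.mod (PySem.Int.floordiv i m) (ip_list.length : Int)) "" ++ " port:" ++ PySem.Int.toStr (8760 + PySem.Int.mod i m) ++ " port:" ++ PySem.Int.toStr (8760 + PySem.Int.mod i m + 1000)],
         if PySem.List.pyGetD ip_list (PySem.Int.mod (PySem.Int.floordiv i m) (ip_list.length : Int)) "" ∈ st.2.1 then st.2.1 else st.2.1 ++ [PySem.List.pyGetD ip_list (PySem.Int.mod (PySem.Int.floordiv i m) (ip_list.length : Int)) ""],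
         st.2.2 + 1))
      (L, U, a)
    = (L ++ (PySem.List.pyRange a (a + (k : Int)) 1).map (pvLineA ip_list m),
       (PySem.List.pyRange a (a + (k : Int)) 1).foldl (fun u i => PySem.Set.add u (pvIpA ip_list m i)) U,
       a + (k : Int)) := by
  induction k with
  | zero => intro a L U; simp [PySem.List.pyRange_one_eq_nil (le_refl a)]
  | succ k ih =>
    intro a L U
    simp only [Nat.cast_add, Nat.cast_one]
    rw [show a + ((k : Int) + 1) = a + 1 + (k : Int) by ring,
      PySem.List.pyRange_one_cons (by omega : a < a + 1 + (k : Int))]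
    simp only [List.foldl_cons, List.map_cons]
    rw [ih (a + 1)]
    simp only [Prod.mk.injEq]
    refine ⟨?_, ?_, trivial⟩
    · simp [pvLineA, pvIpA, List.append_assoc]
    · congr 1
      simp [PySem.Set.add, PySem.Set.contains, pvIpA]

-- adding the same element twice is adding it once
theorem pvAddAdd {α : Type} [BEq α] [LawfulBEq α] (S : PySem.Set α) (x : α) :
    PySem.Set.add (PySem.Set.add S x) x = PySem.Set.add S x := by
  by_cases h : x ∈ S <;> simp [PySem.Set.add, PySem.Set.contains, h]

-- folding Set.add with one fixed element keeps it added once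
theorem pvFoldAddConst {α : Type} [BEq α] [LawfulBEq α] (x : α) (l : List Int) (S : PySem.Set α) :
    l.foldl (fun (u : PySem.Set α) _ => PySem.Set.add u x) (PySem.Set.add S x) = PySem.Set.add S x := by
  induction l generalizing S with
  | nil => rfl
  | cons y t ih => rw [List.foldl_cons, pvAddAdd]; exact ih S

-- the block decomposition of A's normalised loop
theorem pvBlocks (ip_list : List String) (m : Int) (hm : 1 ≤ m) (j : Nat) :
    (PySem.List.pyRange 0 ((j : Int) * m) 1).map (pvLineA ip_list m)
      = (PySem.List.pyRange 0 (j : Int) 1).flatMap (fun b => (PySem.List.pyRange 0 m 1).map (pvLineB ip_list m b))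
    ∧ (PySem.List.pyRange 0 ((j : Int) * m) 1).foldl (fun u i => PySem.Set.add u (pvIpA ip_list m i)) []
      = PySem.Set.ofList ((PySem.List.pyRange 0 (j : Int) 1).map (pvIpB ip_list)) := by
  induction j with
  | zero => simp [PySem.List.pyRange_one_eq_nil (le_refl (0 : Int)), PySem.Set.ofList]
  | succ j ih =>
    simp only [Nat.cast_add, Nat.cast_one]
    have hsplit : PySem.List.pyRange 0 (((j : Int) + 1) * m) 1
        = PySem.List.pyRange 0 ((j : Int) * m) 1 ++ PySem.List.pyRange ((j : Int) * m) (((j : Int) + 1) * m) 1 := by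
      apply PySem.List.pyRange_one_append
      · positivity
      · nlinarith
    have hdiv : ∀ t : Int, 0 ≤ t → t < m → PySem.Int.floordiv ((j : Int) * m + t) m = (j : Int) := by
      intro t h0 h1
      rw [PySem.Int.floordiv_eq_iff_of_pos (by omega)]
      constructor <;> nlinarith
    have hmod : ∀ t : Int, 0 ≤ t → t < m → PySem.Int.mod ((j : Int) * m + t) m = t := by
      intro t h0 h1
      rw [PySem.Int.mod_eq_emod_of_pos (by omega),
        show (j : Int) * m + t = t + m * (j : Int) by ring,
        Int.add_mul_emod_self_left, Int.emod_eq_of_lt h0 h1]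
    have hinner : (PySem.List.pyRange ((j : Int) * m) (((j : Int) + 1) * m) 1).map (pvLineA ip_list m)
        = (PySem.List.pyRange 0 m 1).map (pvLineB ip_list m (j : Int)) := by
      rw [PySem.List.pyRange_one ((j : Int) * m), PySem.List.pyRange_one 0 m]
      simp only [List.map_map]
      rw [show (((j : Int) + 1) * m - (j : Int) * m).toNat = (m - 0).toNat by congr 1; ring]
      apply List.map_congr_left
      intro t ht
      have htm : (t : Int) < m := by
        have := List.mem_range.mp ht
        omega
      simp only [Function.comp]
      unfold pvLineA pvLineB pvIpA pvIpB
      rw [hdiv (t : Int) (by omega) htm, hmod (t : Int) (by omega) htm,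
        show (8760 : Int) + (t : Int) + 1000 = 9760 + (t : Int) by ring,
        show (0 : Int) + (t : Int) = (t : Int) by ring]
    have hinner_ips : ∀ i ∈ PySem.List.pyRange ((j : Int) * m) (((j : Int) + 1) * m) 1,
        pvIpA ip_list m i = pvIpB ip_list (j : Int) := by
      intro i hi
      have hmem := (PySem.List.mem_pyRange_one).mp hi
      unfold pvIpA pvIpB
      rw [show i = (j : Int) * m + (i - (j : Int) * m) by ring]
      rw [hdiv _ (by omega) (by nlinarith [hmem.2])]
    have hlt : (j : Int) * m < ((j : Int) + 1) * m := by nlinarith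
    refine ⟨?_, ?_⟩
    · rw [hsplit, List.map_append, ih.1, hinner,
        PySem.List.pyRange_one_succ_right (by positivity : (0:Int) ≤ (j : Int))]
      simp
    · rw [hsplit, List.foldl_append, ih.2,
        PySem.List.foldl_congr_mem _ _ (fun u _ => PySem.Set.add u (pvIpB ip_list (j : Int))) _
          (fun acc x hx => by rw [hinner_ips x hx]),
        PySem.List.pyRange_one_cons hlt]
      simp only [List.foldl_cons]
      rw [pvFoldAddConst,
        PySem.List.pyRange_one_succ_right (by positivity : (0:Int) ≤ (j : Int))]
      simp [PySem.Set.ofList]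

-- ===== VERDICT (by name: the statement is the Claim_ definition above) =====
theorem generate_servers_spec : Claim_equal_generate_servers := by
  intro ip_list n m _hdom hpre
  obtain ⟨hm, hnil⟩ := hpre
  unfold Spec_generate_servers generate_servers generate_servers_alt
  dsimp only
  set N : Int := if PySem.Int.mod n m ≠ 0 then (-(PySem.Int.floordiv (-n) m)) * m else n with hN
  have hdvd : m ∣ N := by
    rw [hN]; split_ifs with h
    · exact dvd_mul_left m _
    · exact (PySem.Int.mod_eq_zero_iff_dvd n m).mp (not_not.mp h)
  have hNn : N ≤ 0 ↔ n ≤ 0 := by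
    rw [hN]; split_ifs with h
    · rw [PySem.Int.floordiv_eq_ediv_of_pos (by omega : (0:Int) < m)]
      constructor
      · intro hle
        by_contra hn
        push_neg at hn
        have h1 : (-n) / m * m ≤ -n := Int.ediv_mul_le (-n) (by omega)
        nlinarith
      · intro hn
        have h1 : 0 ≤ (-n) / m := Int.ediv_nonneg (by omega) (by omega)
        nlinarith
    · tauto
  by_cases hN0 : N ≤ 0
  · -- both sides empty
    have hq : PySem.Int.floordiv N m ≤ 0 := by
      rw [PySem.Int.floordiv_eq_ediv_of_pos (by omega : (0:Int) < m)]
      have h0 : N / m ≤ 0 / m := Int.ediv_le_ediv (by omega) hN0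
      simpa using h0
    rw [PySem.List.pyRange_one_eq_nil hN0, PySem.List.pyRange_one_eq_nil hq]
    simp [PySem.List.dedup, PySem.Set.ofList]
  · -- main case: N = q * m with q > 0, ip_list ≠ []
    push_neg at hN0
    have hip : ip_list ≠ [] := by
      rcases hnil with h | h
      · exact h
      · exact absurd (hNn.mpr h) (by omega)
    obtain ⟨q, hq⟩ := hdvd
    have hq0 : 0 < q := by nlinarith
    have hfd : PySem.Int.floordiv N m = q := by
      rw [PySem.Int.floordiv_eq_iff_of_pos (by omega : (0:Int) < m)]
      constructor <;> nlinarith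
    have hqN : ((q.toNat : Nat) : Int) = q := Int.toNat_of_nonneg (by omega)
    have htrack := pvTrackA ip_list m N.toNat 0 [] []
    rw [show (0 : Int) + (N.toNat : Int) = N by omega] at htrack
    rw [htrack, hfd]
    simp only [List.nil_append]
    rw [show q = ((q.toNat : Nat) : Int) from hqN.symm,
      show N = ((q.toNat : Nat) : Int) * m by rw [hqN]; linarith [hq]]
    have hblocks := pvBlocks ip_list m hm q.toNat
    simp only [Prod.mk.injEq]
    constructor
    · -- server_lines
      rw [hblocks.1]
      apply List.flatMap_congr
      intro b hb
      have hbmem := (PySem.List.mem_pyRange_one).mp hb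
      apply List.map_congr_left
      intro o _
      unfold pvLineB pvIpB
      rw [PySem.List.pyGetD_map_pyRange_of_nonneg _ _ _ _ hbmem.1 hbmem.2]
    · -- used_ips
      rw [hblocks.2]
      simp only [PySem.List.dedup, PySem.Set.ofList]
      apply congrArg
      apply List.map_congr_left
      intro b _
      rfl
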